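-- pv_equiv track=rewrite | github.com/Aasthaengg/IBMdataset | Python_codes/p03291/s561829893.py | nLeftA
-- ===== SOURCE A (Python) =====
-- MOD = 10 ** 9 + 7
--
-- def nLeftA(S, A):
--     """(S[:i]の'A'の選び方, S[:i]の'?'の埋め方)"""
--     l = [(0, 1)]
--     for s in S:
--         a, q = l[-1]
--         if s == A:
--             a = q + a      # S[i-1]を選ぶ + S[:i]のどれかを選ぶ
--         elif s == '?':
--             a = q + a * 3  # S[i-1]を選ぶ + S[:i]のどれかを選ぶ(?に3通り)
--             q = q * 3
--         l.append((a % MOD, q % MOD))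
--     return l
-- ===== SOURCE B (Python) =====
-- MOD = 10 ** 9 + 7
--
-- def nLeftA(S, A):
--     # Stage 1: prefix counts of matches and '?'s; Stage 2: map each count pair
--     # through the closed form a = cA*3^cQ + cQ*3^(cQ-1), q = 3^cQ (mod MOD).
--     counts = [(0, 0)]
--     cA = cQ = 0
--     for s in S:
--         if s == A:
--             cA += 1
--         elif s == '?':
--             cQ += 1
--         counts.append((cA, cQ))
--     return [((cA * pow(3, cQ, MOD) + cQ * pow(3, cQ - 1, MOD) if cQ else cA) % MOD,
--              pow(3, cQ, MOD)) for cA, cQ in counts]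
-- ===== Notes on version B (the rewrite author's own statement) =====
-- stated objective: alternative
-- what changed: Replaces A's single-pass DP recurrence (carried in the list's last pair) by two stages: build the list of prefix counts (cA matches, cQ '?'s), then map each count pair through the closed form a = cA*3^cQ + cQ*3^(cQ-1), q = 3^cQ computed with modular pow.
import Mathlib
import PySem

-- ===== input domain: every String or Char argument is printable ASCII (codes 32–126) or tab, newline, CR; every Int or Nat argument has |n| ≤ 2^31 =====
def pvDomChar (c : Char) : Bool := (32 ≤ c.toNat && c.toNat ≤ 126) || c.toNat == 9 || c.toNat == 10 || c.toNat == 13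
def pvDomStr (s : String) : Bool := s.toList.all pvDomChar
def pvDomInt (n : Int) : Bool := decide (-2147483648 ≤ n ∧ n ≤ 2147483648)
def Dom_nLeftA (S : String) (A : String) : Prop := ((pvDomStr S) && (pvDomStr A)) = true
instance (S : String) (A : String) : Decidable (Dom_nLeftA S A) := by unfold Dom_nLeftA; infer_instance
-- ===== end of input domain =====

-- B replaces A's DP recurrence by two stages: a prefix-count list (matches, '?'s) built by
-- structural recursion, then a map applying the closed form a = cA*3^cQ + cQ*3^(cQ-1), q = 3^cQ
-- (mod MOD); alternative decomposition, same asymptotic cost.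


def pvMOD : Int := 1000000007

-- ===== PORT A =====
-- loop body of A: read last pair, update by the recurrence, append reduced pair
def pvStepA (A : String) (st : (Int × Int) × List (Int × Int)) (s : Char) :
    (Int × Int) × List (Int × Int) :=
  let a := st.1.1
  let q := st.1.2
  let p : Int × Int :=
    if String.singleton s == A then (q + a, q)
    else if s == '?' then (q + a * 3, q * 3)
    else (a, q)
  ((p.1 % pvMOD, p.2 % pvMOD), st.2 ++ [(p.1 % pvMOD, p.2 % pvMOD)])

def nLeftA (S : String) (A : String) : List (Int × Int) :=
  (S.toList.foldl (pvStepA A) ((0, 1), [((0 : Int), (1 : Int))])).2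

-- ===== PORT B =====
-- stage 1 of B: the list of (cA, cQ) prefix-count pairs (one per consumed character)
def pvCounts (A : String) (cs : List Char) (cA cQ : Nat) : List (Nat × Nat) :=
  match cs with
  | [] => []
  | s :: rest =>
    if String.singleton s == A then (cA + 1, cQ) :: pvCounts A rest (cA + 1) cQ
    else if s == '?' then (cA, cQ + 1) :: pvCounts A rest cA (cQ + 1)
    else (cA, cQ) :: pvCounts A rest cA cQ

-- Python's pow(3, k, MOD), ported as the corresponding modular power
def pvPow3 (k : Nat) : Int := (3 : Int) ^ k % pvMOD

-- stage 2 of B: the closed form applied to one count pair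
def pvForm (p : Nat × Nat) : Int × Int :=
  ((if p.2 ≠ 0 then (p.1 : Int) * pvPow3 p.2 + (p.2 : Int) * pvPow3 (p.2 - 1)
    else (p.1 : Int)) % pvMOD,
   pvPow3 p.2)

def nLeftA_alt (S : String) (A : String) : List (Int × Int) :=
  (((0, 0) : Nat × Nat) :: pvCounts A S.toList 0 0).map pvForm

-- ===== PRECONDITION & SPEC =====
def Spec_nLeftA (S : String) (A : String) (out : List (Int × Int)) : Prop := out = nLeftA_alt S A
instance (S : String) (A : String) (out : List (Int × Int)) : Decidable (Spec_nLeftA S A out) := by unfold Spec_nLeftA; infer_instance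

-- ===== CLAIM (what is proved, stated in full; the proofs are below) =====
def Claim_equal_nLeftA : Prop := ∀ (S : String) (A : String), Dom_nLeftA S A → Spec_nLeftA S A (nLeftA S A)

-- ===== LEMMAS AND PROOFS =====
theorem pv_emod_modEq (x : Int) : Int.ModEq pvMOD (x % pvMOD) x :=
  Int.emod_emod_of_dvd x dvd_rfl

theorem pvForm_fst_red (p : Nat × Nat) : (pvForm p).1 % pvMOD = (pvForm p).1 :=
  Int.emod_emod_of_dvd _ dvd_rfl

theorem pvForm_snd_red (p : Nat × Nat) : (pvForm p).2 % pvMOD = (pvForm p).2 :=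
  Int.emod_emod_of_dvd _ dvd_rfl

theorem pvPow3_succ (k : Nat) : Int.ModEq pvMOD (3 * pvPow3 k) (pvPow3 (k + 1)) := by
  unfold pvPow3
  calc (3 : Int) * ((3:Int) ^ k % pvMOD)
      ≡ 3 * 3 ^ k [ZMOD pvMOD] := Int.ModEq.mul_left 3 (pv_emod_modEq _)
    _ = 3 ^ (k + 1) := by ring
    _ ≡ 3 ^ (k + 1) % pvMOD [ZMOD pvMOD] := (pv_emod_modEq _).symm

-- step facts: A's three updates land exactly on the closed form of the new counts
theorem pv_stepA_eq (cA cQ : Nat) :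
    ((pvForm (cA, cQ)).2 + (pvForm (cA, cQ)).1) % pvMOD = (pvForm (cA + 1, cQ)).1 := by
  by_cases h : cQ = 0
  · subst h
    show ((pvPow3 0) + ((cA : Int)) % pvMOD) % pvMOD = ((cA : Int) + 1) % pvMOD
    calc ((pvPow3 0) + ((cA : Int)) % pvMOD) % pvMOD
        = (1 + (cA : Int) % pvMOD) % pvMOD := by norm_num [pvPow3, pvMOD]
      _ = (1 + (cA : Int)) % pvMOD := Int.ModEq.add_left 1 (pv_emod_modEq _)
      _ = ((cA : Int) + 1) % pvMOD := by ring_nf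
  · simp only [pvForm, h, if_pos, ne_eq, not_false_iff]
    have : Int.ModEq pvMOD
        (pvPow3 cQ + ((cA : Int) * pvPow3 cQ + (cQ : Int) * pvPow3 (cQ - 1)) % pvMOD)
        (((cA : Int) + 1) * pvPow3 cQ + (cQ : Int) * pvPow3 (cQ - 1)) := by
      calc pvPow3 cQ + ((cA : Int) * pvPow3 cQ + (cQ : Int) * pvPow3 (cQ - 1)) % pvMOD
          ≡ pvPow3 cQ + ((cA : Int) * pvPow3 cQ + (cQ : Int) * pvPow3 (cQ - 1))
            [ZMOD pvMOD] := Int.ModEq.add_left _ (pv_emod_modEq _)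
        _ = ((cA : Int) + 1) * pvPow3 cQ + (cQ : Int) * pvPow3 (cQ - 1) := by ring
    have h1 := this
    push_cast
    exact h1

theorem pv_stepQ_a (cA cQ : Nat) :
    ((pvForm (cA, cQ)).2 + (pvForm (cA, cQ)).1 * 3) % pvMOD = (pvForm (cA, cQ + 1)).1 := by
  have hgoalR : (pvForm (cA, cQ + 1)).1
      = ((cA : Int) * pvPow3 (cQ + 1) + ((cQ : Int) + 1) * pvPow3 cQ) % pvMOD := by
    simp only [pvForm, Nat.succ_ne_zero, ne_eq, not_false_iff, if_true, Nat.add_sub_cancel]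
    push_cast; ring_nf
  rw [hgoalR]
  by_cases h : cQ = 0
  · subst h
    show ((pvPow3 0) + ((cA : Int)) % pvMOD * 3) % pvMOD
        = ((cA : Int) * pvPow3 1 + (0 + 1) * pvPow3 0) % pvMOD
    calc ((pvPow3 0) + ((cA : Int)) % pvMOD * 3) % pvMOD
        = (1 + (cA : Int) % pvMOD * 3) % pvMOD := by norm_num [pvPow3, pvMOD]
      _ = (1 + (cA : Int) * 3) % pvMOD :=
          Int.ModEq.add_left 1 (Int.ModEq.mul_right 3 (pv_emod_modEq _))
      _ = ((cA : Int) * pvPow3 1 + (0 + 1) * pvPow3 0) % pvMOD := by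
          norm_num [pvPow3, pvMOD]; ring_nf
  · simp only [pvForm, h, ne_eq, not_false_iff, if_true]
    have key : Int.ModEq pvMOD
        (pvPow3 cQ + ((cA : Int) * pvPow3 cQ + (cQ : Int) * pvPow3 (cQ - 1)) % pvMOD * 3)
        ((cA : Int) * pvPow3 (cQ + 1) + ((cQ : Int) + 1) * pvPow3 cQ) := by
      have hq : cQ - 1 + 1 = cQ := Nat.succ_pred_eq_of_pos (Nat.pos_of_ne_zero h)
      have h3 : Int.ModEq pvMOD (3 * pvPow3 (cQ - 1)) (pvPow3 cQ) := by
        have := pvPow3_succ (cQ - 1); rwa [hq] at this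
      calc pvPow3 cQ + ((cA : Int) * pvPow3 cQ + (cQ : Int) * pvPow3 (cQ - 1)) % pvMOD * 3
          ≡ pvPow3 cQ + ((cA : Int) * pvPow3 cQ + (cQ : Int) * pvPow3 (cQ - 1)) * 3
            [ZMOD pvMOD] := Int.ModEq.add_left _ (Int.ModEq.mul_right 3 (pv_emod_modEq _))
        _ = (cA : Int) * (3 * pvPow3 cQ) + (cQ : Int) * (3 * pvPow3 (cQ - 1)) + pvPow3 cQ := by
            ring
        _ ≡ (cA : Int) * pvPow3 (cQ + 1) + (cQ : Int) * pvPow3 cQ + pvPow3 cQ [ZMOD pvMOD] :=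
            Int.ModEq.add_right _
              (Int.ModEq.add ((pvPow3_succ cQ).mul_left _) (h3.mul_left _))
        _ = (cA : Int) * pvPow3 (cQ + 1) + ((cQ : Int) + 1) * pvPow3 cQ := by ring
    exact key
theorem pv_stepQ_q (cQ : Nat) : (pvPow3 cQ * 3) % pvMOD = pvPow3 (cQ + 1) := by
  have := pvPow3_succ cQ
  calc (pvPow3 cQ * 3) % pvMOD = (3 * pvPow3 cQ) % pvMOD := by ring_nf
    _ = pvPow3 (cQ + 1) % pvMOD := this
    _ = pvPow3 (cQ + 1) := Int.emod_emod_of_dvd _ dvd_rfl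

-- loop invariant: A's carried pair is exactly pvForm of B's current counts
theorem pv_loop (A : String) (cs : List Char) :
    ∀ (cA cQ : Nat) (acc : List (Int × Int)),
      (cs.foldl (pvStepA A) (pvForm (cA, cQ), acc)).2
        = acc ++ (pvCounts A cs cA cQ).map pvForm := by
  induction cs with
  | nil => intro cA cQ acc; simp [pvCounts]
  | cons s cs ih =>
    intro cA cQ acc
    simp only [List.foldl_cons, pvStepA, pvCounts]
    by_cases hA : String.singleton s == A
    · simp only [hA, if_true, List.map_cons]
      have ha := pv_stepA_eq cA cQ
      have hq := pvForm_snd_red (cA, cQ)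
      rw [ha, hq]
      have hpair : ((pvForm (cA + 1, cQ)).1, (pvForm (cA, cQ)).2)
          = pvForm (cA + 1, cQ) := by
        have : (pvForm (cA, cQ)).2 = (pvForm (cA + 1, cQ)).2 := rfl
        rw [this]
      rw [hpair, ih]
      simp
    · simp only [hA, Bool.false_eq_true, if_false]
      by_cases hQ : s == '?'
      · simp only [hQ, if_true, List.map_cons]
        have ha := pv_stepQ_a cA cQ
        have hq : (pvForm (cA, cQ)).2 * 3 % pvMOD = (pvForm (cA, cQ + 1)).2 :=
          pv_stepQ_q cQ
        rw [ha, hq, ih]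
        simp
      · simp only [hQ, Bool.false_eq_true, if_false, List.map_cons]
        rw [pvForm_fst_red, pvForm_snd_red, ih]
        simp

-- ===== VERDICT (by name: the statement is the Claim_ definition above) =====
theorem nLeftA_spec : Claim_equal_nLeftA := by
  intro S A _
  unfold Spec_nLeftA nLeftA nLeftA_alt
  have h0 : (((0 : Int), (1 : Int))) = pvForm (0, 0) := by decide
  rw [h0, pv_loop A S.toList 0 0 [pvForm (0, 0)], List.map_cons]
  rfl
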